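-- pv_equiv track=rewrite | github.com/Mingkai2233/origin | normalPractice/basic/greedy/projectProfit.py | getTheMostMoney
-- ===== SOURCE A (Python) =====
-- import queue
--
-- class Project:
--     def __init__(self, cost, profit):
--         self.cost = cost
--         self.profit = profit
--
--     def __lt__(self, other):
--         return self.profit < other.profit
--
-- def getTheMostMoney(costs: list, profits, money, amount):
--     projects = [Project(costs[i], profits[i]) for i in range(len(costs))]
--     bigProfitH = queue.PriorityQueue()
--     projects.sort(key=lambda x: x.cost, reverse=True)
--     n = 0
--     while n < amount:
--         while len(projects) > 0:  # 将当前资金能够支持的项目加入到一个大根堆中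
--             index = len(projects)-1
--             if money > projects[index].cost:
--                 project = projects.pop()
--                 bigProfitH.put(-project.profit)
--             else:
--                 break
--         if bigProfitH.empty():  # 表明当前资金不足以支持任何项目,无法完成指定个数的项目
--             break
--         else:
--             money += -bigProfitH.get()
--             n += 1
--     return money
-- ===== SOURCE B (Python) =====
-- def getTheMostMoney(costs: list, profits, money, amount):
--     # Heap-free rewrite: keep locked projects as (cost, profit) pairs and a flat
--     # pool of unlocked profits; each round move newly affordable projects into
--     # the pool and take its maximum by a linear scan.
--     locked = [(costs[i], profits[i]) for i in range(len(costs))]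
--     pool = []
--     for _ in range(amount):
--         pool += [p for c, p in locked if money > c]
--         locked = [(c, p) for c, p in locked if not money > c]
--         if not pool:
--             break
--         best = max(pool)
--         pool.remove(best)
--         money += best
--     return money
-- ===== Notes on version B (the rewrite author's own statement) =====
-- stated objective: simpler
-- what changed: Replaces A's descending cost-sort plus priority-queue of negated profits by a plain list of still-locked (cost, profit) pairs and a flat pool of unlocked profits whose maximum is found by a linear scan each round (no sort, no heap).
import Mathlib
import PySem

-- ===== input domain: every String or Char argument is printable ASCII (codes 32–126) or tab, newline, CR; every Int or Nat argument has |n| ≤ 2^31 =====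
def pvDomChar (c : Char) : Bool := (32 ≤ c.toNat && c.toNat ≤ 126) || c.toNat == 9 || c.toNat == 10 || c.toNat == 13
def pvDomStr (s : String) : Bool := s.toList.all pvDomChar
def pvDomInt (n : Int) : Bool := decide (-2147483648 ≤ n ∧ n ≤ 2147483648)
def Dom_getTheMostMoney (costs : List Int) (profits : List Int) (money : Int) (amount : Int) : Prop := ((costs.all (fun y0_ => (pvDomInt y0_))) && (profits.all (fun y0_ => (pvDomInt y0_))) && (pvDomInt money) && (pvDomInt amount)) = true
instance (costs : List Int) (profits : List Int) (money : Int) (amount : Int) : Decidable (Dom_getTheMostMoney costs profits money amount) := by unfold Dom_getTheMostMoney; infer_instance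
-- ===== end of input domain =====

-- B replaces A's cost-sorted stack + priority queue by a plain list of still-locked
-- projects and a flat pool of unlocked profits scanned for its maximum each round
-- (objective: simpler — no sort, no heap).

-- ===== PORT A =====
-- inner `while len(projects) > 0: … pop from the end …` loop; the heap holds the
-- negated profits (bigProfitH.put(-project.profit))
def pvPopLoopA (ps : List (Int × Int)) (h : List Int) (money : Int) :
    List (Int × Int) × List Int :=
  if hne : ps.isEmpty then (ps, h)
  else
    -- index = len(projects)-1; projects[index] is the last element
    let p := ps.getLast (by simpa [List.isEmpty_iff] using hne)
    if money > p.1 then pvPopLoopA ps.dropLast (h ++ [-p.2]) money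
    else (ps, h)
termination_by ps.length
decreasing_by
  have : ps ≠ [] := by simpa [List.isEmpty_iff] using hne
  have := List.length_pos_iff.mpr this
  simp [List.length_dropLast]; omega

-- outer `while n < amount` loop; PriorityQueue.get = remove and return the minimum
def pvLoopA : Nat → List (Int × Int) → List Int → Int → Int
  | 0, _, _, money => money
  | Nat.succ k, ps, h, money =>
    let r := pvPopLoopA ps h money
    match PySem.List.min? r.2 (fun x => x) with
    | none => money
    | some m => pvLoopA k r.1 (r.2.erase m) (money + (-m))

def getTheMostMoney (costs : List Int) (profits : List Int) (money : Int) (amount : Int) : Int :=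
  -- costs[i], profits[i]: in range under Pre_ (getD default never read there)
  let projects := (List.range costs.length).map (fun i => (costs.getD i 0, profits.getD i 0))
  let sortedProjects := PySem.List.sorted projects (fun p => p.1) true
  pvLoopA amount.toNat sortedProjects [] money

-- ===== PORT B =====
def pvLoopB : Nat → List (Int × Int) → List Int → Int → Int
  | 0, _, _, money => money
  | Nat.succ k, locked, pool, money =>
    let pool' := pool ++ (locked.filter (fun cp => money > cp.1)).map (fun cp => cp.2)
    let still := locked.filter (fun cp => !(money > cp.1 : Bool))
    match PySem.List.max? pool' (fun x => x) with
    | none => money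
    | some best => pvLoopB k still (pool'.erase best) (money + best)

def getTheMostMoney_alt (costs : List Int) (profits : List Int) (money : Int) (amount : Int) : Int :=
  pvLoopB amount.toNat (costs.zip profits) [] money

-- ===== PRECONDITION & SPEC =====
-- Python A evaluates profits[i] for every i < len(costs): it raises IndexError
-- exactly when profits is shorter than costs.
def Pre_getTheMostMoney (costs : List Int) (profits : List Int) (money : Int) (amount : Int) : Prop :=
  costs.length ≤ profits.length
instance (costs : List Int) (profits : List Int) (money : Int) (amount : Int) : Decidable (Pre_getTheMostMoney costs profits money amount) := by unfold Pre_getTheMostMoney; infer_instance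

def pvWitness_getTheMostMoney : List Int × List Int × Int × Int := ([1, 2], [3, 4], 2, 2)

def Spec_getTheMostMoney (costs : List Int) (profits : List Int) (money : Int) (amount : Int) (out : Int) : Prop := out = getTheMostMoney_alt costs profits money amount
instance (costs : List Int) (profits : List Int) (money : Int) (amount : Int) (out : Int) : Decidable (Spec_getTheMostMoney costs profits money amount out) := by unfold Spec_getTheMostMoney; infer_instance

-- ===== CLAIM (what is proved, stated in full; the proofs are below) =====
def Claim_equal_getTheMostMoney : Prop := ∀ (costs : List Int) (profits : List Int) (money : Int) (amount : Int), Dom_getTheMostMoney costs profits money amount → Pre_getTheMostMoney costs profits money amount → Spec_getTheMostMoney costs profits money amount (getTheMostMoney costs profits money amount)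

-- ===== LEMMAS AND PROOFS =====

-- snoc step of the pop-from-the-end loop
theorem pvPopLoopA_concat (init : List (Int × Int)) (p : Int × Int) (h : List Int)
    (money : Int) :
    pvPopLoopA (init ++ [p]) h money =
      if money > p.1 then pvPopLoopA init (h ++ [-p.2]) money else (init ++ [p], h) := by
  rw [pvPopLoopA]
  simp

-- On a cost-descending list, A's pop-from-the-end loop removes exactly the
-- affordable projects and pushes their negated profits (in some order).
theorem pvPopLoopA_spec (ps : List (Int × Int)) (h : List Int) (money : Int)
    (hs : ps.Pairwise (fun a b => b.1 ≤ a.1)) :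
    (pvPopLoopA ps h money).1 = ps.filter (fun p => !(money > p.1 : Bool)) ∧
    (pvPopLoopA ps h money).2.Perm
      (h ++ (ps.filter (fun p => (money > p.1 : Bool))).map (fun p => -p.2)) := by
  induction ps using List.reverseRecOn generalizing h with
  | nil => simp [pvPopLoopA]
  | append_singleton init p ih =>
    have hpair := hs
    rw [List.pairwise_append] at hpair
    have hinit : init.Pairwise (fun a b => b.1 ≤ a.1) := hpair.1
    have hrel : ∀ a ∈ init, p.1 ≤ a.1 := by
      intro a ha; exact hpair.2.2 a ha p (by simp)
    rw [pvPopLoopA_concat]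
    by_cases hp : money > p.1
    · rw [if_pos hp]
      obtain ⟨h1, h2⟩ := ih (h ++ [-p.2]) hinit
      constructor
      · rw [h1, List.filter_append]
        simp [hp]
      · rw [List.filter_append]
        simp only [hp, decide_true, List.filter_cons, List.filter_nil,
          if_pos, List.map_append, List.map_cons, List.map_nil]
        refine h2.trans ?_
        rw [List.append_assoc]
        exact List.Perm.append_left h List.perm_append_comm
    · rw [if_neg hp]
      have hall : ∀ a ∈ init ++ [p], ¬ (money > a.1) := by
        intro a ha
        rcases List.mem_append.mp ha with hmem | hmem
        · have := hrel a hmem; omega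
        · simp at hmem; subst hmem; exact hp
      constructor
      · rw [List.filter_eq_self.mpr]
        intro a ha; simpa using hall a ha
      · rw [List.filter_eq_nil_iff.mpr]
        · simp
        · intro a ha; simpa using hall a ha

-- min of a list of negations is the negation of the max of the originals
theorem pv_min_neg_max (l1 l2 : List Int) (hperm : l1.Perm (l2.map (fun x => -x))) :
    (PySem.List.min? l1 (fun x => x) = none ↔ PySem.List.max? l2 (fun x => x) = none) ∧
    (∀ m M, PySem.List.min? l1 (fun x => x) = some m →
      PySem.List.max? l2 (fun x => x) = some M → m = -M) := by
  constructor
  · rw [PySem.List.min?_eq_none_iff, PySem.List.max?_eq_none_iff]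
    have hlen : l1.length = l2.length := by simpa using hperm.length_eq
    constructor
    · intro h1
      subst h1
      exact List.eq_nil_of_length_eq_zero (by simpa using hlen.symm)
    · intro h2
      subst h2
      exact List.eq_nil_of_length_eq_zero (by simpa using hlen)
  · intro m M hm hM
    have hmmem : m ∈ l1 := PySem.List.min?_mem hm
    have hmmin : ∀ y ∈ l1, m ≤ y := PySem.List.min?_isMin hm
    have hMmem : M ∈ l2 := PySem.List.max?_mem hM
    have hMmax : ∀ y ∈ l2, y ≤ M := PySem.List.max?_isMax hM
    have h1 : m ∈ l2.map (fun x => -x) := hperm.mem_iff.mp hmmem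
    obtain ⟨y0, hy0, hy0e⟩ := List.mem_map.mp h1
    have h2 : (-M) ∈ l1 := hperm.mem_iff.mpr (List.mem_map.mpr ⟨M, hMmem, rfl⟩)
    have := hmmin _ h2
    have := hMmax y0 hy0
    omega

-- the main loop invariant: A's (sorted remainder, neg-profit heap) tracks
-- B's (locked remainder, profit pool) up to permutation
theorem pvLoop_eq (k : Nat) :
    ∀ (ps locked : List (Int × Int)) (h pool : List Int) (money : Int),
    ps.Pairwise (fun a b => b.1 ≤ a.1) → ps.Perm locked →
    h.Perm (pool.map (fun x => -x)) →
    pvLoopA k ps h money = pvLoopB k locked pool money := by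
  induction k with
  | zero => intro _ _ _ _ _ _ _ _; rfl
  | succ k ih =>
    intro ps locked h pool money hs hp hh
    obtain ⟨r1, r2⟩ := pvPopLoopA_spec ps h money hs
    rw [pvLoopA, pvLoopB]
    set pool' := pool ++ (locked.filter (fun cp => money > cp.1)).map (fun cp => cp.2) with hpool'
    have hperm2 : (pvPopLoopA ps h money).2.Perm (pool'.map (fun x => -x)) := by
      refine r2.trans ?_
      rw [hpool', List.map_append, List.map_map]
      refine List.Perm.append hh ?_
      have : (ps.filter (fun p => (money > p.1 : Bool))).Perm
          (locked.filter (fun p => (money > p.1 : Bool))) := hp.filter _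
      simpa [Function.comp] using this.map (fun p => -p.2)
    obtain ⟨hnone, hsome⟩ := pv_min_neg_max _ _ hperm2
    cases hmin : PySem.List.min? (pvPopLoopA ps h money).2 (fun x => x) with
    | none =>
      rw [hnone.mp hmin]
    | some m =>
      cases hmax : PySem.List.max? pool' (fun x => x) with
      | none =>
        rw [hnone.mpr hmax] at hmin
        simp at hmin
      | some M =>
        have hmM : m = -M := hsome m M hmin hmax
        subst hmM
        dsimp only
        rw [neg_neg]
        apply ih
        · rw [r1]; exact hs.filter _
        · rw [r1]; exact hp.filter _
        · have he : ((pvPopLoopA ps h money).2.erase (-M)).Perm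
              ((pool'.map (fun x => -x)).erase (-M)) := hperm2.erase _
          refine he.trans ?_
          rw [List.map_erase (fun a b hab => by simpa using hab)]

-- under Pre_, A's range/index comprehension is exactly zip
theorem pv_projects_eq_zip (costs profits : List Int)
    (hle : costs.length ≤ profits.length) :
    (List.range costs.length).map (fun i => (costs.getD i 0, profits.getD i 0)) =
      costs.zip profits := by
  apply List.ext_getElem
  · simp [List.length_zip]; omega
  · intro i h1 h2
    simp only [List.getElem_map, List.getElem_range, List.getElem_zip]
    have hi : i < costs.length := by simpa using h1
    rw [List.getD_eq_getElem costs 0 hi, List.getD_eq_getElem profits 0 (by omega)]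

-- ===== VERDICT (by name: the statement is the Claim_ definition above) =====
theorem getTheMostMoney_spec : Claim_equal_getTheMostMoney := by
  intro costs profits money amount _ hpre
  unfold Spec_getTheMostMoney getTheMostMoney getTheMostMoney_alt
  rw [pv_projects_eq_zip costs profits hpre]
  apply pvLoop_eq
  · exact PySem.List.sorted_pairwise_rev _ _
  · exact PySem.List.sorted_perm _ _ _
  · simp
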